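-- pv_equiv track=rewrite | github.com/microsoft/semanticworkbench | mcp-servers/mcp-server-filesystem-edit/mcp_server_filesystem_edit/tools/edit_adapters/markdown.py | combine_newline_blocks
-- ===== SOURCE A (Python) =====
-- def combine_newline_blocks(blocks: list[tuple[int, int]], text: str) -> list[tuple[int, int]]:
--     """Combines blocks that are just a newline with the previous block."""
--     new_blocks = []
--     i = 0
--     while i < len(blocks):
--         current_start, current_end = blocks[i]
--         # Look ahead for newline blocks
--         while (
--             i + 1 < len(blocks)
--             and blocks[i + 1][1] - blocks[i + 1][0] == 1  # Check if the block is length 1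
--             and text[blocks[i + 1][0] : blocks[i + 1][1]] == "\n"
--         ):  # Block is a newline
--             current_end = blocks[i + 1][1]
--             i += 1
--
--         new_blocks.append((current_start, current_end))
--         i += 1
--
--     return new_blocks
-- ===== SOURCE B (Python) =====
-- def combine_newline_blocks(blocks: list[tuple[int, int]], text: str) -> list[tuple[int, int]]:
--     """Combines blocks that are just a newline with the previous block."""
--     new_blocks = []
--     for start, end in blocks:
--         if new_blocks and end - start == 1 and text[start:end] == "\n":
--             new_blocks[-1] = (new_blocks[-1][0], end)
--         else:
--             new_blocks.append((start, end))
--     return new_blocks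
-- ===== Notes on version B (the rewrite author's own statement) =====
-- stated objective: simpler
-- what changed: Replaced the index-driven outer while with a nested look-ahead while by a single flat for-loop that either appends a block or extends the last emitted block in place when the block is a lone newline.
import Mathlib
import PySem

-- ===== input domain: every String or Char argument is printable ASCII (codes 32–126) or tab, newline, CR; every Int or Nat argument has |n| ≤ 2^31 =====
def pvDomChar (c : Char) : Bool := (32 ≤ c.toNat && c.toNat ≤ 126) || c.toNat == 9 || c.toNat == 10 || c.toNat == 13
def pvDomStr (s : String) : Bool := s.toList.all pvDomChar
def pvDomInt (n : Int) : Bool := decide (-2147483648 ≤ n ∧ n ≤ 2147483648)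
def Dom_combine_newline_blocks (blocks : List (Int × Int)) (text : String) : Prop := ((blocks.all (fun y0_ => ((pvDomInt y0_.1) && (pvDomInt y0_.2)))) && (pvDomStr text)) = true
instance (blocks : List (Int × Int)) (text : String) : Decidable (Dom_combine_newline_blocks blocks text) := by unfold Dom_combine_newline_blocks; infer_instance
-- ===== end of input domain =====

-- B replaces A's index-driven outer while plus nested look-ahead while by one flat
-- loop that appends a block or extends the last emitted block; same O(n) cost, simpler.

-- shared literal check "blocks[j][1] - blocks[j][0] == 1 and text[a:b] == '\n'"
-- (Python string slice ported exactly via PySem.List.slice on the char list)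
def pvIsNewline (text : String) (s e : Int) : Bool :=
  (e - s == 1) && (PySem.List.slice text.toList (some s) (some e) == ['\n'])

-- ===== PORT A =====
-- A's inner look-ahead while: consumes leading newline blocks, returns (current_end, rest)
def pvSkipNL (text : String) (ce : Int) : List (Int × Int) → Int × List (Int × Int)
  | [] => (ce, [])
  | (s, e) :: tl => if pvIsNewline text s e then pvSkipNL text e tl else (ce, (s, e) :: tl)

theorem pvSkipNL_len (text : String) (ce : Int) (l : List (Int × Int)) :
    (pvSkipNL text ce l).2.length ≤ l.length := by
  induction l generalizing ce with
  | nil => simp [pvSkipNL]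
  | cons h tl ih =>
    obtain ⟨s, e⟩ := h
    simp only [pvSkipNL]
    split
    · exact le_trans (ih e) (Nat.le_succ _)
    · simp

-- A's outer while over the block index, as structural recursion on the remaining blocks
def pvALoop (text : String) : List (Int × Int) → List (Int × Int)
  | [] => []
  | (s, e) :: tl =>
    let r := pvSkipNL text e tl
    (s, r.1) :: pvALoop text r.2
termination_by l => l.length
decreasing_by
  exact Nat.lt_succ_of_le (pvSkipNL_len text e tl)

def combine_newline_blocks (blocks : List (Int × Int)) (text : String) : List (Int × Int) :=
  pvALoop text blocks

-- ===== PORT B =====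
-- B's flat loop body: append, or extend the last emitted block (accumulator kept reversed,
-- so Python's new_blocks[-1] is the head; reversed once at the end)
def pvBStep (text : String) (acc : List (Int × Int)) (b : Int × Int) : List (Int × Int) :=
  match acc with
  | [] => [b]
  | (ls, _) :: t => if pvIsNewline text b.1 b.2 then (ls, b.2) :: t else b :: acc

def combine_newline_blocks_alt (blocks : List (Int × Int)) (text : String) : List (Int × Int) :=
  (blocks.foldl (pvBStep text) []).reverse

-- ===== PRECONDITION & SPEC =====
def Spec_combine_newline_blocks (blocks : List (Int × Int)) (text : String) (out : List (Int × Int)) : Prop := out = combine_newline_blocks_alt blocks text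
instance (blocks : List (Int × Int)) (text : String) (out : List (Int × Int)) : Decidable (Spec_combine_newline_blocks blocks text out) := by unfold Spec_combine_newline_blocks; infer_instance

-- ===== CLAIM (what is proved, stated in full; the proofs are below) =====
def Claim_equal_combine_newline_blocks : Prop := ∀ (blocks : List (Int × Int)) (text : String), Dom_combine_newline_blocks blocks text → Spec_combine_newline_blocks blocks text (combine_newline_blocks blocks text)

-- ===== LEMMAS AND PROOFS =====

-- B's fold over a run of leading newline blocks does exactly what A's look-ahead does
theorem pvFold_skip (text : String) (tl : List (Int × Int)) (s ce : Int) (acc : List (Int × Int)) :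
    List.foldl (pvBStep text) ((s, ce) :: acc) tl
      = List.foldl (pvBStep text) ((s, (pvSkipNL text ce tl).1) :: acc) (pvSkipNL text ce tl).2 := by
  induction tl generalizing ce with
  | nil => simp [pvSkipNL]
  | cons h tl ih =>
    obtain ⟨s', e'⟩ := h
    by_cases hnl : pvIsNewline text s' e' = true
    · simp only [pvSkipNL, hnl, if_pos, List.foldl_cons]
      rw [show pvBStep text ((s, ce) :: acc) (s', e') = (s, e') :: acc by
        simp [pvBStep, hnl]]
      exact ih e'
    · simp only [pvSkipNL, hnl, if_neg, Bool.false_eq_true, not_false_iff]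

-- the rest A's look-ahead leaves never starts with a newline block
theorem pvSkipNL_head (text : String) (ce : Int) (l : List (Int × Int)) (s e : Int)
    (t : List (Int × Int)) (h : (pvSkipNL text ce l).2 = (s, e) :: t) :
    pvIsNewline text s e = false := by
  induction l generalizing ce with
  | nil => simp [pvSkipNL] at h
  | cons hd tl ih =>
    obtain ⟨s', e'⟩ := hd
    by_cases hnl : pvIsNewline text s' e' = true
    · simp only [pvSkipNL, hnl, if_pos] at h
      exact ih e' h
    · simp only [pvSkipNL, hnl, if_neg, Bool.false_eq_true, not_false_iff] at h
      obtain ⟨⟨rfl, rfl⟩, rfl⟩ := by simpa using h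
      simpa using hnl

-- main invariant: B's fold from a safe accumulator equals A's loop output (reversed) ++ acc
theorem pvMain (text : String) (n : Nat) :
    ∀ (blocks : List (Int × Int)), blocks.length ≤ n →
      ∀ (acc : List (Int × Int)),
        (acc = [] ∨ ∀ s e t, blocks = (s, e) :: t → pvIsNewline text s e = false) →
        List.foldl (pvBStep text) acc blocks = (pvALoop text blocks).reverse ++ acc := by
  induction n with
  | zero =>
    intro blocks hlen acc _
    have : blocks = [] := List.eq_nil_of_length_eq_zero (Nat.le_zero.mp hlen)
    subst this; simp [pvALoop]
  | succ n ih =>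
    intro blocks hlen acc hacc
    match blocks with
    | [] => simp [pvALoop]
    | (s, e) :: tl =>
      have hstep : pvBStep text acc (s, e) = (s, e) :: acc := by
        rcases hacc with h | h
        · subst h; rfl
        · have hnl := h s e tl rfl
          match acc with
          | [] => rfl
          | (ls, le) :: t => simp [pvBStep, hnl]
      rw [List.foldl_cons, hstep, pvFold_skip]
      have hrlen : (pvSkipNL text e tl).2.length ≤ n := by
        have := pvSkipNL_len text e tl
        simp at hlen; omega
      rw [ih (pvSkipNL text e tl).2 hrlen _
        (Or.inr (fun s' e' t' h => pvSkipNL_head text e tl s' e' t' h))]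
      simp [pvALoop]

-- ===== VERDICT (by name: the statement is the Claim_ definition above) =====
theorem combine_newline_blocks_spec : Claim_equal_combine_newline_blocks := by
  intro blocks text _
  unfold Spec_combine_newline_blocks combine_newline_blocks combine_newline_blocks_alt
  rw [pvMain text blocks.length blocks le_rfl [] (Or.inl rfl)]
  simp
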